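/- GENERATED by farm/mkstatement.py from design/units.tsv (unit `sincos_quadrant`) and the Specs of Vorbis/Spec/*.lean — do not edit.
   THE STATEMENT of the proof unit `sincos_quadrant`: the function `sincos_quadrant` (46 instructions) satisfies its contract,
   given the contracts of its callees. What the names mean: Vorbis/Spec/Basic.lean. The theorem to prove:
   `theorem sincos_quadrant_ok : Vorbis.Spec.sincos_quadrant.Statement`. -/
import Vorbis.Spec.Libm
namespace Vorbis.Spec.sincos_quadrant
open X86 X86.User Asan

/-- The statement of unit `sincos_quadrant`. -/
def Statement : Prop :=
  ∀ (Lay : Layout) (_hLay : Lay.hi = 0x1000000) (μ : Microarch) (_hμ : UserX.MicroOK μ) (u₀ : State)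
    (_hcode : HasCodeNat Lay u₀ Vorbis.L.sincos_quadrant.entry Vorbis.Code.code_sincos_quadrant.nat Vorbis.L.sincos_quadrant.size)
    (_h_floor : ∀ (others : List Obj) (frames : List (Nat × FrameLayout)), Calls Lay μ Vorbis.WayInv (Vorbis.conv u₀) Vorbis.L.floor.entry (Vorbis.Spec.floor.spec others frames))
    (_h_cos_poly : ∀ (others : List Obj) (frames : List (Nat × FrameLayout)), Calls Lay μ Vorbis.WayInv (Vorbis.conv u₀) Vorbis.L.cos_poly.entry (Vorbis.Spec.cos_poly.spec others frames))
    (_h_sin_poly : ∀ (others : List Obj) (frames : List (Nat × FrameLayout)), Calls Lay μ Vorbis.WayInv (Vorbis.conv u₀) Vorbis.L.sin_poly.entry (Vorbis.Spec.sin_poly.spec others frames)),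
    ∀ (others : List Obj) (frames : List (Nat × FrameLayout)), Calls Lay μ Vorbis.WayInv (Vorbis.conv u₀) Vorbis.L.sincos_quadrant.entry (Vorbis.Spec.sincos_quadrant.spec others frames)

end Vorbis.Spec.sincos_quadrant
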